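-- pv_equiv track=rewrite | github.com/Giswater/giswater_qgis_plugin | packages/swmm_api/report_file/helpers.py | _get_title_of_part
-- ===== SOURCE A (Python) =====
-- def _get_title_of_part(part, alt):
--     """
--     read title in part text of the report file
--
--     Args:
--         part (str): string of a part in the report file
--         alt: alternative title
--
--     Returns:
--         str: title of the part
--     """
--     if 'STORM WATER MANAGEMENT MODEL - VERSION' in part:
--         return 'Version+Title'
--
--     elif 'NOTE:' in part:
--         return 'Note'
--
--     else:
--         lines = part.split('\n')
--         for no, line in enumerate(lines):
--             if no == 0 or no == len(lines) - 1:
--                 continue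
--             if '***' in lines[no + 1] and '***' in lines[no - 1]:
--                 start_char = lines[no - 1].index('*')
--                 len_title = lines[no - 1].count('*')
--                 return line[start_char:start_char + len_title].strip()
--         return str(alt)
-- ===== SOURCE B (Python) =====
-- def _get_title_of_part(part, alt):
--     if 'STORM WATER MANAGEMENT MODEL - VERSION' in part:
--         return 'Version+Title'
--     if 'NOTE:' in part:
--         return 'Note'
--     lines = part.split('\n')
--     # one pass collecting the indices of every '***' line, then scan that
--     # (short) index list for the first i whose i+2 is also a star line
--     stars = [i for i, line in enumerate(lines) if '***' in line]
--     for i in stars: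
--         if i + 2 in stars:
--             start = lines[i].index('*')
--             return lines[i + 1][start:start + lines[i].count('*')].strip()
--     return str(alt)
-- ===== Notes on version B (the rewrite author's own statement) =====
-- stated objective: alternative
-- what changed: B replaces A's single index-arithmetic scan testing lines[no-1]/lines[no+1] around every middle line by first collecting the list of '***'-line indices and then scanning only that list for the first i with i+2 also a star index.
import Mathlib
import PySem

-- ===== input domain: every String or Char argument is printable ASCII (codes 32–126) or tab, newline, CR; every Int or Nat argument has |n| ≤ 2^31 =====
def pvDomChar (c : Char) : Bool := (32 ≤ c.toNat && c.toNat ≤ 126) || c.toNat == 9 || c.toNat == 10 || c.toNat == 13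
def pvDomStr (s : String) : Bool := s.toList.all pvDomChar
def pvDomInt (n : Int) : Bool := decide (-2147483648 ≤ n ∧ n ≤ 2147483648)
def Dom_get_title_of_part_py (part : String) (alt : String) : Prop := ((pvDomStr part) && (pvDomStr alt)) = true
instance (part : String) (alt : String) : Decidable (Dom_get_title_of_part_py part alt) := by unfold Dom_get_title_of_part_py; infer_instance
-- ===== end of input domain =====

-- B replaces A's index-arithmetic scan over all lines by a precomputed list of the
-- '***'-line indices, scanned for the first i with i+2 also a star line (objective: alternative).

-- '***' in s / '*' handling shared by both sources verbatim:
-- line[start:start+len_title].strip() with start = prev.index('*'), len_title = prev.count('*')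
def pvTitleAt (prev line : String) : String :=
  PySem.Str.strip (PySem.Str.slice line (some (PySem.Str.find prev "*"))
    (some (PySem.Str.find prev "*" + (PySem.Str.count prev "*" : Int))))

-- ===== PORT A =====
-- the for-loop over `no, line in enumerate(lines)` with its two `continue`/return branches
def pvLoopA (lines : List String) (alt : String) (no : Nat) : String :=
  if no < lines.length then
    if no = 0 ∨ no = lines.length - 1 then pvLoopA lines alt (no + 1)
    else if PySem.Str.isIn "***" (lines.getD (no + 1) "") && PySem.Str.isIn "***" (lines.getD (no - 1) "") then
      pvTitleAt (lines.getD (no - 1) "") (lines.getD no "")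
    else pvLoopA lines alt (no + 1)
  else alt    -- str(alt) on a str is alt
termination_by lines.length - no

def get_title_of_part_py (part : String) (alt : String) : String :=
  if PySem.Str.isIn "STORM WATER MANAGEMENT MODEL - VERSION" part then "Version+Title"
  else if PySem.Str.isIn "NOTE:" part then "Note"
  else
    -- part.split('\n'): split? is some because the separator is non-empty
    pvLoopA ((PySem.Str.split? part "\n").getD []) alt 0

-- ===== PORT B =====
-- stars = [i for i, line in enumerate(lines) if '***' in line]
def pvStars (lines : List String) : List Nat :=
  (List.range lines.length).filter (fun i => PySem.Str.isIn "***" (lines.getD i ""))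

-- for i in stars: if i + 2 in stars: return …
def pvLoopB (lines : List String) (stars : List Nat) (alt : String) : List Nat → String
  | [] => alt
  | i :: rest =>
    if (i + 2) ∈ stars then pvTitleAt (lines.getD i "") (lines.getD (i + 1) "")
    else pvLoopB lines stars alt rest

def get_title_of_part_py_alt (part : String) (alt : String) : String :=
  if PySem.Str.isIn "STORM WATER MANAGEMENT MODEL - VERSION" part then "Version+Title"
  else if PySem.Str.isIn "NOTE:" part then "Note"
  else
    let lines := (PySem.Str.split? part "\n").getD []
    let stars := pvStars lines
    pvLoopB lines stars alt stars

-- ===== PRECONDITION & SPEC =====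
def Spec_get_title_of_part_py (part : String) (alt : String) (out : String) : Prop := out = get_title_of_part_py_alt part alt
instance (part : String) (alt : String) (out : String) : Decidable (Spec_get_title_of_part_py part alt out) := by unfold Spec_get_title_of_part_py; infer_instance

-- ===== CLAIM (what is proved, stated in full; the proofs are below) =====
def Claim_equal_get_title_of_part_py : Prop := ∀ (part : String) (alt : String), Dom_get_title_of_part_py part alt → Spec_get_title_of_part_py part alt (get_title_of_part_py part alt)

-- ===== LEMMAS AND PROOFS =====

-- the Bool predicate under which A's loop returns at position no
def pvPredA (lines : List String) (no : Nat) : Bool :=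
  !(no = 0 ∨ no = lines.length - 1 : Bool) &&
    (PySem.Str.isIn "***" (lines.getD (no + 1) "") && PySem.Str.isIn "***" (lines.getD (no - 1) ""))

theorem pvLoopA_eq_find (lines : List String) (alt : String) :
    ∀ (k no : Nat), no + k = lines.length →
    pvLoopA lines alt no =
      match (List.range' no k).find? (pvPredA lines) with
      | some m => pvTitleAt (lines.getD (m - 1) "") (lines.getD m "")
      | none => alt := by
  intro k
  induction k with
  | zero =>
    intro no h
    unfold pvLoopA
    simp [List.range'] at *
    omega
  | succ k ih =>
    intro no h
    have hlt : no < lines.length := by omega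
    rw [pvLoopA, List.range'_succ, List.find?_cons]
    by_cases h0 : no = 0 ∨ no = lines.length - 1
    · have : pvPredA lines no = false := by simp [pvPredA, h0]
      simp only [this, if_pos hlt, if_pos h0]
      exact ih (no + 1) (by omega)
    · have hpred : pvPredA lines no =
          (PySem.Str.isIn "***" (lines.getD (no + 1) "") && PySem.Str.isIn "***" (lines.getD (no - 1) "")) := by
        simp [pvPredA, h0]
      simp only [if_pos hlt, if_neg h0, hpred]
      cases hc : PySem.Str.isIn "***" (lines.getD (no + 1) "") && PySem.Str.isIn "***" (lines.getD (no - 1) "") with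
      | true => simp
      | false => simpa [hc] using ih (no + 1) (by omega)

theorem pvLoopB_eq_find (lines : List String) (stars : List Nat) (alt : String) :
    ∀ (l : List Nat), pvLoopB lines stars alt l =
      match l.find? (fun i => decide ((i + 2) ∈ stars)) with
      | some i => pvTitleAt (lines.getD i "") (lines.getD (i + 1) "")
      | none => alt := by
  intro l
  induction l with
  | nil => simp [pvLoopB]
  | cons i rest ih =>
    rw [pvLoopB, List.find?_cons]
    by_cases hm : (i + 2) ∈ stars
    · simp [hm]
    · simpa [hm] using ih

-- membership in the star-index list
theorem pvMem_stars (lines : List String) (j : Nat) :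
    j ∈ pvStars lines ↔ j < lines.length ∧ PySem.Str.isIn "***" (lines.getD j "") = true := by
  simp [pvStars, List.mem_filter, List.mem_range]

-- the shift: A's first hit at no corresponds to B's first star index i = no - 1
-- no List.find?_congr in the library: pointwise-equal predicates give the same find?
theorem pvFind?_congr_mem {l : List Nat} {p q : Nat → Bool} (h : ∀ x ∈ l, p x = q x) :
    l.find? p = l.find? q := by
  induction l with
  | nil => rfl
  | cons a l ih =>
    rw [List.find?_cons, List.find?_cons, h a (by simp)]
    cases q a with
    | true => rfl
    | false => exact ih fun x hx => h x (by simp [hx])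

theorem pvFind_shift' (lines : List String) (q : Nat → Bool)
    (hq : ∀ i, q i = decide (i + 2 < lines.length ∧ PySem.Str.isIn "***" (lines.getD (i + 2) "") = true)) :
    (List.range lines.length).find? (pvPredA lines) =
      (((List.range lines.length).filter (fun i => PySem.Str.isIn "***" (lines.getD i ""))).find? q).map (· + 1) := by
  rw [List.find?_filter]
  cases hn : lines.length with
  | zero => rfl
  | succ m =>
    have h0 : pvPredA lines 0 = false := by simp [pvPredA]
    conv_lhs => rw [List.range_succ_eq_map]
    rw [List.find?_cons_of_neg (by simp [h0]), List.find?_map]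
    conv_rhs => rw [List.range_succ]
    have hm : (fun a => decide (PySem.Str.isIn "***" (lines.getD a "") = true ∧ q a = true)) m = false := by
      simp only [hq, hn, decide_eq_true_eq, decide_eq_false_iff_not]
      rintro ⟨-, hlt, -⟩
      omega
    rw [List.find?_append, List.find?_singleton]
    simp only [hm, Bool.false_eq_true, if_false, Option.or_none]
    have hcongr : (List.range m).find? (pvPredA lines ∘ Nat.succ) =
        (List.range m).find? (fun a => decide (PySem.Str.isIn "***" (lines.getD a "") = true ∧ q a = true)) := by
      apply pvFind?_congr_mem
      intro i hi
      have him : i < m := List.mem_range.mp hi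
      simp only [Function.comp, pvPredA, hq, hn, Nat.succ_eq_add_one,
        show i + 1 + 1 = i + 2 from rfl, show i + 1 - 1 = i from rfl]
      cases hstar : PySem.Str.isIn "***" (lines.getD i "") with
      | false => simp
      | true =>
        cases hstar2 : PySem.Str.isIn "***" (lines.getD (i + 2) "") with
        | false => simp
        | true =>
          rcases Nat.lt_or_ge (i + 2) (m + 1) with hlt | hge
          · simp [hlt]
            omega
          · simp [Nat.not_lt_of_ge hge]
            omega
    rw [hcongr]

theorem pvFind_shift (lines : List String) :
    (List.range lines.length).find? (pvPredA lines) =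
      ((pvStars lines).find? (fun i => decide ((i + 2) ∈ pvStars lines))).map (· + 1) := by
  apply pvFind_shift'
  intro i
  exact decide_eq_decide.mpr (pvMem_stars lines (i + 2))

theorem pv_main (lines : List String) (alt : String) :
    pvLoopA lines alt 0 = pvLoopB lines (pvStars lines) alt (pvStars lines) := by
  rw [pvLoopA_eq_find lines alt lines.length 0 (by omega),
      pvLoopB_eq_find, ← List.range_eq_range', pvFind_shift]
  cases (pvStars lines).find? (fun i => decide ((i + 2) ∈ pvStars lines)) with
  | none => rfl
  | some i => simp

-- ===== VERDICT (by name: the statement is the Claim_ definition above) =====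
theorem get_title_of_part_py_spec : Claim_equal_get_title_of_part_py := by
  intro part alt _
  unfold Spec_get_title_of_part_py
  simp only [get_title_of_part_py, get_title_of_part_py_alt]
  split_ifs
  · rfl
  · rfl
  · exact pv_main _ alt
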